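-- pv_equiv track=rewrite | github.com/tirabo/Matematica-Discreta-I | python/grafos.py | encuentra_libre
-- ===== SOURCE A (Python) =====
-- def encuentra_libre(grafo, l_ver): # necesaria para circuitos eulerianos (aparentemente no se usa)
--     # pre: grafo: lista de adyacencia, l_ver: lista de vértices,
--     # post: devuelve un j en l_ver tal que  grafo[j] no es vacío.  Si no hay devuelve -1
--     ret = -1
--     j = 0
--     while j < len(grafo) and (len(grafo[j]) == 0 or j not in l_ver):
--             j = j + 1
--     if j != len(grafo):
--         ret = j
--     return ret
-- ===== SOURCE B (Python) =====
-- def encuentra_libre(grafo, l_ver):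
--     candidatos = [v for v in l_ver if 0 <= v < len(grafo) and len(grafo[v]) > 0]
--     return min(candidatos) if candidatos else -1
-- ===== Notes on version B (the rewrite author's own statement) =====
-- stated objective: alternative
-- what changed: Replaced the ordered early-exit index scan with membership test by a single filter over l_ver plus a min aggregation.
import Mathlib
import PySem

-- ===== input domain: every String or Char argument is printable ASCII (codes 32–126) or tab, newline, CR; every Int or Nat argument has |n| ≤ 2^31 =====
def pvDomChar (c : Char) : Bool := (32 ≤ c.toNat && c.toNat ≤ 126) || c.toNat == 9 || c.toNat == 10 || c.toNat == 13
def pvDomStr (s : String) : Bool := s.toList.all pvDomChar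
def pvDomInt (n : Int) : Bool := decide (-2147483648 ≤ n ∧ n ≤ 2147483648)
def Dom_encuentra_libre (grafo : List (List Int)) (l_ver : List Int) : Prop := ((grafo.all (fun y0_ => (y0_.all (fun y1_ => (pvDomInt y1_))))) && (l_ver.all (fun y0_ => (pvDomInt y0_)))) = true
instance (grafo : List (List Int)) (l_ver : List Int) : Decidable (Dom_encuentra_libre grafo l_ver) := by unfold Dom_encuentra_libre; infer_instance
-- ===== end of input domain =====

-- B replaces A's ordered early-exit index scan (with an inner membership test) by a
-- filter over l_ver plus a min aggregation; equal return value on every input (alternative decomposition).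

-- ===== PORT A =====
-- the while loop of A, step for step: advance j while the condition holds
def elLoop (grafo : List (List Int)) (l_ver : List Int) (j : Nat) : Nat :=
  if h : j < grafo.length then
    if (grafo[j].length == 0) || !(l_ver.contains (j : Int)) then
      elLoop grafo l_ver (j + 1)
    else j
  else j
termination_by grafo.length - j

def encuentra_libre (grafo : List (List Int)) (l_ver : List Int) : Int :=
  let ret : Int := -1
  let j := elLoop grafo l_ver 0
  if j ≠ grafo.length then (j : Int) else ret

-- ===== PORT B =====
def encuentra_libre_alt (grafo : List (List Int)) (l_ver : List Int) : Int :=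
  let candidatos := l_ver.filter (fun v =>
    decide (0 ≤ v) && decide (v < (grafo.length : Int)) &&
    decide (0 < ((PySem.List.pyGet? grafo v).getD []).length))
  match PySem.List.min? candidatos (fun x => x) with
  | some m => m
  | none => -1

-- ===== PRECONDITION & SPEC =====
def Spec_encuentra_libre (grafo : List (List Int)) (l_ver : List Int) (out : Int) : Prop := out = encuentra_libre_alt grafo l_ver
instance (grafo : List (List Int)) (l_ver : List Int) (out : Int) : Decidable (Spec_encuentra_libre grafo l_ver out) := by unfold Spec_encuentra_libre; infer_instance

-- ===== CLAIM (what is proved, stated in full; the proofs are below) =====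
def Claim_equal_encuentra_libre : Prop := ∀ (grafo : List (List Int)) (l_ver : List Int), Dom_encuentra_libre grafo l_ver → Spec_encuentra_libre grafo l_ver (encuentra_libre grafo l_ver)

-- ===== LEMMAS AND PROOFS =====

-- Q g l k: index k qualifies (in range, nonempty row, and k appears in l)
def Q (g : List (List Int)) (l : List Int) (k : Nat) : Prop :=
  ∃ h : k < g.length, g[k].length ≠ 0 ∧ (k : Int) ∈ l

lemma elLoop_spec (g : List (List Int)) (l : List Int) :
    ∀ n j, g.length - j ≤ n → j ≤ g.length →
    j ≤ elLoop g l j ∧ elLoop g l j ≤ g.length ∧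
    (∀ i, j ≤ i → i < elLoop g l j → ¬ Q g l i) ∧
    (elLoop g l j < g.length → Q g l (elLoop g l j)) := by
  intro n
  induction n with
  | zero =>
    intro j hj hjle
    have hjl : g.length ≤ j := by omega
    rw [elLoop]
    have hnlt : ¬ j < g.length := by omega
    rw [dif_neg hnlt]
    refine ⟨le_refl _, by omega, fun i h1 h2 => by omega, fun hh => absurd hh (by omega)⟩
  | succ n ih =>
    intro j hj hjle
    rw [elLoop]
    by_cases h : j < g.length
    · simp only [h, dite_true]
      by_cases hc : ((g[j].length == 0) || !(l.contains (j : Int))) = true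
      · simp only [hc, if_true]
        have ihj := ih (j + 1) (by omega) (by omega)
        have hnQ : ¬ Q g l j := by
          intro ⟨hlt, hne, hmem⟩
          rcases Bool.or_eq_true_iff.mp hc with h1 | h1
          · exact hne (by simpa using h1)
          · simp only [Bool.not_eq_true', List.contains_eq_mem, decide_eq_false_iff_not] at h1
            exact h1 (by simpa using hmem)
        refine ⟨by omega, ihj.2.1, ?_, ihj.2.2.2⟩
        intro i h1 h2
        by_cases hij : i = j
        · subst hij; exact hnQ
        · exact ihj.2.2.1 i (by omega) h2
      · rw [if_neg hc]
        refine ⟨le_refl _, by omega, fun i h1 h2 => by omega, fun _ => ?_⟩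
        simp only [Bool.or_eq_true, not_or, Bool.not_eq_true] at hc
        refine ⟨h, ?_, ?_⟩
        · have := hc.1; simpa using this
        · have := hc.2; simpa [List.contains_eq_mem] using this
    · rw [dif_neg h]
      refine ⟨le_refl _, by omega, fun i h1 h2 => by omega, fun hh => absurd hh (by omega)⟩

-- the filter predicate of B holds for v ∈ l exactly when v is a qualifying index
lemma filter_pred_iff (g : List (List Int)) (v : Int) :
    ((decide (0 ≤ v) && decide (v < (g.length : Int)) &&
      decide (0 < ((PySem.List.pyGet? g v).getD []).length)) = true)
    ↔ (0 ≤ v ∧ ∃ h : v.toNat < g.length, g[v.toNat].length ≠ 0) := by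
  constructor
  · intro hp
    simp only [Bool.and_eq_true, decide_eq_true_eq] at hp
    obtain ⟨⟨h0, hlt⟩, hlen⟩ := hp
    have hnat : v.toNat < g.length := by omega
    refine ⟨h0, hnat, ?_⟩
    have hv : v = ((v.toNat : Nat) : Int) := by omega
    rw [hv, PySem.List.pyGet?_natCast] at hlen
    rw [List.getElem?_eq_getElem hnat] at hlen
    simp only [Option.getD_some] at hlen
    omega
  · intro ⟨h0, hnat, hne⟩
    simp only [Bool.and_eq_true, decide_eq_true_eq]
    have hv : v = ((v.toNat : Nat) : Int) := by omega
    refine ⟨⟨h0, by omega⟩, ?_⟩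
    rw [hv, PySem.List.pyGet?_natCast, List.getElem?_eq_getElem hnat]
    simp only [Option.getD_some]
    omega

lemma mem_candidatos_iff (g : List (List Int)) (l : List Int) (v : Int) :
    v ∈ l.filter (fun v =>
      decide (0 ≤ v) && decide (v < (g.length : Int)) &&
      decide (0 < ((PySem.List.pyGet? g v).getD []).length))
    ↔ (0 ≤ v ∧ Q g l v.toNat) := by
  rw [List.mem_filter]
  constructor
  · intro ⟨hmem, hp⟩
    obtain ⟨h0, hnat, hne⟩ := (filter_pred_iff g v).mp hp
    exact ⟨h0, hnat, hne, by rwa [Int.toNat_of_nonneg h0]⟩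
  · intro ⟨h0, hnat, hne, hmem⟩
    rw [Int.toNat_of_nonneg h0] at hmem
    exact ⟨hmem, (filter_pred_iff g v).mpr ⟨h0, hnat, hne⟩⟩

-- ===== VERDICT (by name: the statement is the Claim_ definition above) =====
theorem encuentra_libre_spec : Claim_equal_encuentra_libre := by
  unfold Claim_equal_encuentra_libre Spec_encuentra_libre
  intro g l _
  unfold encuentra_libre encuentra_libre_alt
  simp only []
  set cand := l.filter (fun v =>
    decide (0 ≤ v) && decide (v < (g.length : Int)) &&
    decide (0 < ((PySem.List.pyGet? g v).getD []).length)) with hcand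
  obtain ⟨hge, hle, hmin, hq⟩ := elLoop_spec g l (g.length - 0) 0 (le_refl _) (Nat.zero_le _)
  set r := elLoop g l 0 with hr
  cases hm : PySem.List.min? cand (fun x => x) with
  | none =>
    have hnil : cand = [] := (PySem.List.min?_eq_none_iff cand (fun x => x)).mp hm
    -- no qualifying index exists, so r must have run to the end
    have hnoQ : ∀ k, ¬ Q g l k := by
      intro k hQ
      have : (k : Int) ∈ cand := (mem_candidatos_iff g l (k : Int)).mpr
        ⟨Int.natCast_nonneg k, by simpa using hQ⟩
      rw [hnil] at this; exact absurd this (List.not_mem_nil)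
    have hrl : r = g.length := by
      by_contra hne
      exact hnoQ r (hq (by omega))
    simp [hrl]
  | some m =>
    have hmmem : m ∈ cand := PySem.List.min?_mem hm
    obtain ⟨h0, hQm⟩ := (mem_candidatos_iff g l m).mp hmmem
    obtain ⟨hmlt, hrest⟩ := hQm
    have hQm : Q g l m.toNat := ⟨hmlt, hrest⟩
    -- r < length: otherwise m.toNat < r and ¬ Q m.toNat, contradiction
    have hrlt : r < g.length := by
      by_contra hge'
      exact hmin m.toNat (Nat.zero_le _) (by omega) hQm
    have hQr := hq hrlt
    have hrcand : (r : Int) ∈ cand := (mem_candidatos_iff g l (r : Int)).mpr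
      ⟨Int.natCast_nonneg r, by simpa using hQr⟩
    have hmr : m ≤ (r : Int) := PySem.List.min?_isMin hm _ hrcand
    have hrm : (r : Int) ≤ m := by
      by_contra hlt
      exact hmin m.toNat (Nat.zero_le _) (by omega) hQm
    have : m = (r : Int) := le_antisymm hmr hrm
    have hne : r ≠ g.length := by omega
    simp [hne, this]
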